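-- pv_equiv track=rewrite | github.com/tgkei/Algorithm_study | by_python/coupang/3.py | solution
-- ===== SOURCE A (Python) =====
-- def solution(k, score):
--     answer = -1
--     cache = dict()
--     for prev_score, cur_score in zip(score[0:], score[1:]):
--         diff = prev_score - cur_score
--         if diff not in cache:
--             tmp = set()
--             cache[diff] = [1, tmp]
--         else:
--             cache[diff][0] += 1
--         cache[diff][1].add(prev_score)
--         cache[diff][1].add(cur_score)
--     answer_set = set()
--     for _, arr in cache.items():
--         diff, ranks = arr[0], arr[1]
--         if diff >= k:
--             answer_set = answer_set.union(ranks)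
--
--     answer = len(score) - len(answer_set)
--
--     return answer
-- ===== SOURCE B (Python) =====
-- def solution(k, score):
--     pairs = sorted(zip(score, score[1:]), key=lambda p: p[0] - p[1])
--     kept = set()
--     run = []
--     for p in pairs:
--         if run and run[0][0] - run[0][1] != p[0] - p[1]:
--             if len(run) >= k:
--                 for a, b in run:
--                     kept.add(a)
--                     kept.add(b)
--             run = []
--         run.append(p)
--     if len(run) >= k:
--         for a, b in run:
--             kept.add(a)
--             kept.add(b)
--     return len(score) - len(kept)
-- ===== Notes on version B (the rewrite author's own statement) =====
-- stated objective: alternative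
-- what changed: Replaces A's hash-dict of fused [count, value-set] per difference (plus a union loop over the dict) with a sort-based group-by: sort the consecutive pairs by their difference once, then a single linear scan over the sorted pairs that accumulates each equal-difference run and flushes the run's values into the kept set when the run has length >= k.
import Mathlib
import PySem

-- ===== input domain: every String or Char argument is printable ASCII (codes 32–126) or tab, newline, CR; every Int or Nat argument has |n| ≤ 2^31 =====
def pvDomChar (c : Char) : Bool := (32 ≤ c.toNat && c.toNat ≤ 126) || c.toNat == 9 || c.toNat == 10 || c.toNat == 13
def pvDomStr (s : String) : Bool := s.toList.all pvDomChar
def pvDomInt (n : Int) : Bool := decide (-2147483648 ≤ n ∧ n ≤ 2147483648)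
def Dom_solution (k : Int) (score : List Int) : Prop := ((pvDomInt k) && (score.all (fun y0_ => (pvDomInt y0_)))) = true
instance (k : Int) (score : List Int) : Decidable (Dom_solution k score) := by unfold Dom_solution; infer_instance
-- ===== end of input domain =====

-- B replaces A's fused dict-of-[count, value-set] pass (plus a union loop over the dict) with a
-- sort-based group-by: sort the consecutive pairs by their difference, scan the sorted list once
-- accumulating each equal-difference run, and flush runs of length >= k into the kept set.

-- ===== PORT A =====
-- loop body of A's first 'for' (the fused count-and-collect pass)
def stepA (cache : PySem.Dict Int (Int × PySem.Set Int)) (pr : Int × Int) :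
    PySem.Dict Int (Int × PySem.Set Int) :=
  let diff := pr.1 - pr.2
  let cache :=
    if cache.contains diff then
      cache.modify diff (0, PySem.Set.empty) (fun a => (a.1 + 1, a.2))
    else
      cache.insert diff (1, PySem.Set.empty)
  cache.modify diff (0, PySem.Set.empty)
    (fun a => (a.1, PySem.Set.add (PySem.Set.add a.2 pr.1) pr.2))

-- loop body of A's second 'for' (union of qualifying value-sets)
def stepU (k : Int) (s : PySem.Set Int) (it : Int × (Int × PySem.Set Int)) : PySem.Set Int :=
  if it.2.1 ≥ k then PySem.Set.union s it.2.2 else s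

def solution (k : Int) (score : List Int) : Int :=
  let cache :=
    ((PySem.List.slice score (some 0) none).zip (PySem.List.slice score (some 1) none)).foldl
      stepA PySem.Dict.empty
  let answerSet := cache.items.foldl (stepU k) PySem.Set.empty
  (score.length : Int) - PySem.Set.len answerSet

-- ===== PORT B =====
-- 'if len(run) >= k: for a, b in run: kept.add(a); kept.add(b)'
def flushB (k : Int) (kept : PySem.Set Int) (run : List (Int × Int)) : PySem.Set Int :=
  if (run.length : Int) ≥ k then
    run.foldl (fun s pr => PySem.Set.add (PySem.Set.add s pr.1) pr.2) kept
  else kept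

-- body of B's 'for p in pairs' loop: state = (run, kept)
def stepB (k : Int) (st : List (Int × Int) × PySem.Set Int) (p : Int × Int) :
    List (Int × Int) × PySem.Set Int :=
  match st with
  | (run, kept) =>
    match run with
    | [] => ([p], kept)
    | q :: rest =>
      if q.1 - q.2 ≠ p.1 - p.2 then ([p], flushB k kept (q :: rest))
      else (run ++ [p], kept)

def solution_alt (k : Int) (score : List Int) : Int :=
  let pairs := PySem.List.sorted (score.zip (PySem.List.slice score (some 1) none))
      (fun p => p.1 - p.2) false
  let st := pairs.foldl (stepB k) ([], PySem.Set.empty)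
  let kept := flushB k st.2 st.1
  (score.length : Int) - PySem.Set.len kept

-- ===== PRECONDITION & SPEC =====
def Spec_solution (k : Int) (score : List Int) (out : Int) : Prop := out = solution_alt k score
instance (k : Int) (score : List Int) (out : Int) : Decidable (Spec_solution k score out) := by unfold Spec_solution; infer_instance

-- ===== CLAIM =====
def Claim_equal_solution : Prop := ∀ (k : Int) (score : List Int), Dom_solution k score → Spec_solution k score (solution k score)

-- ===== LEMMAS AND PROOFS =====

-- the difference of a consecutive pair
def prDiff (pr : Int × Int) : Int := pr.1 - pr.2

-- the values contributed to diff-class d by the pairs of l, in insertion order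
def vals (l : List (Int × Int)) (d : Int) : List Int :=
  (l.filter (fun pr => prDiff pr = d)).flatMap (fun pr => [pr.1, pr.2])

lemma stepA_getD (c : PySem.Dict Int (Int × PySem.Set Int)) (pr : Int × Int) (d : Int) :
    (stepA c pr).getD d (0, PySem.Set.empty) =
      if d = pr.1 - pr.2 then
        ((c.getD (pr.1 - pr.2) (0, PySem.Set.empty)).1 + 1,
          PySem.Set.add (PySem.Set.add (c.getD (pr.1 - pr.2) (0, PySem.Set.empty)).2 pr.1) pr.2)
      else c.getD d (0, PySem.Set.empty) := by
  unfold stepA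
  by_cases h : c.contains (pr.1 - pr.2)
  · simp only [h, if_true]
    by_cases hd : d = pr.1 - pr.2
    · subst hd
      simp [PySem.Dict.getD_modify_self]
    · simp [PySem.Dict.getD_modify_of_ne _ _ _ hd, hd]
  · rw [Bool.not_eq_true] at h
    simp only [h, Bool.false_eq_true, if_false]
    by_cases hd : d = pr.1 - pr.2
    · subst hd
      simp [PySem.Dict.getD_modify_self, PySem.Dict.getD_insert_self,
        PySem.Dict.getD_of_not_contains c _ h]
    · simp [PySem.Dict.getD_modify_of_ne _ _ _ hd, PySem.Dict.getD_insert_of_ne, hd]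

lemma stepA_keys (c : PySem.Dict Int (Int × PySem.Set Int)) (pr : Int × Int) :
    (stepA c pr).keys = PySem.Set.add c.keys (pr.1 - pr.2) := by
  unfold stepA
  by_cases h : c.contains (pr.1 - pr.2)
  · have hmem : pr.1 - pr.2 ∈ c.keys := (PySem.Dict.contains_iff_mem_keys c _).mp h
    simp only [h, if_true, PySem.Dict.modify]
    rw [PySem.Dict.keys_insert_of_contains _ _ (by simp),
      PySem.Dict.keys_insert_of_contains _ _ h, PySem.Set.add_of_mem hmem]
  · have h' : c.contains (pr.1 - pr.2) = false := by simpa using h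
    have hmem : pr.1 - pr.2 ∉ c.keys := fun hm => by
      simp [(PySem.Dict.contains_iff_mem_keys c _).mpr hm] at h
    simp only [h', Bool.false_eq_true, if_false, PySem.Dict.modify]
    rw [PySem.Dict.keys_insert_of_contains _ _ (by simp),
      PySem.Dict.keys_insert_of_not_contains _ _ h', PySem.Set.add_of_not_mem hmem]

lemma cacheA_keys (l : List (Int × Int)) (c : PySem.Dict Int (Int × PySem.Set Int)) :
    (l.foldl stepA c).keys = PySem.Set.update c.keys (l.map prDiff) := by
  induction l generalizing c with
  | nil => simp [PySem.Set.update]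
  | cons pr l ih =>
      simp only [List.foldl_cons, List.map_cons, PySem.Set.update_cons]
      rw [ih, stepA_keys]
      rfl

lemma cacheA_getD (l : List (Int × Int)) (c : PySem.Dict Int (Int × PySem.Set Int)) (d : Int) :
    (l.foldl stepA c).getD d (0, PySem.Set.empty) =
      ((c.getD d (0, PySem.Set.empty)).1 + (l.map prDiff).count d,
        PySem.Set.update (c.getD d (0, PySem.Set.empty)).2 (vals l d)) := by
  induction l generalizing c with
  | nil => simp [vals, PySem.Set.update]
  | cons pr l ih =>
      simp only [List.foldl_cons]
      rw [ih, stepA_getD]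
      by_cases hd : d = pr.1 - pr.2
      · subst hd
        rw [if_pos rfl]
        simp only [vals, prDiff, List.filter_cons, List.map_cons, List.count_cons,
          Prod.mk.injEq]
        simp only [decide_eq_true_eq, beq_self_eq_true]
        exact ⟨by push_cast; ring, rfl⟩
      · have hd' : ¬(pr.1 - pr.2 = d) := fun h => hd h.symm
        rw [if_neg hd]
        simp [vals, prDiff, hd']

lemma mem_foldl_stepU (k : Int) (items : List (Int × (Int × PySem.Set Int)))
    (s : PySem.Set Int) (x : Int) :
    x ∈ items.foldl (stepU k) s ↔ x ∈ s ∨ ∃ it ∈ items, k ≤ it.2.1 ∧ x ∈ it.2.2 := by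
  induction items generalizing s with
  | nil => simp
  | cons it items ih =>
      simp only [List.foldl_cons, ih, stepU]
      by_cases hk : it.2.1 ≥ k
      · simp only [if_pos hk, PySem.Set.mem_union]
        constructor
        · rintro ((hx | hx) | ⟨jt, hjt, h1, h2⟩)
          · exact Or.inl hx
          · exact Or.inr ⟨it, by simp, hk, hx⟩
          · exact Or.inr ⟨jt, by simp [hjt], h1, h2⟩
        · rintro (hx | ⟨jt, hjt, h1, h2⟩)
          · exact Or.inl (Or.inl hx)
          · rcases List.mem_cons.mp hjt with h | h
            · subst h; exact Or.inl (Or.inr h2)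
            · exact Or.inr ⟨jt, h, h1, h2⟩
      · simp only [if_neg hk]
        constructor
        · rintro (hx | ⟨jt, hjt, h1, h2⟩)
          · exact Or.inl hx
          · exact Or.inr ⟨jt, by simp [hjt], h1, h2⟩
        · rintro (hx | ⟨jt, hjt, h1, h2⟩)
          · exact Or.inl hx
          · rcases List.mem_cons.mp hjt with h | h
            · subst h; exact absurd h1 hk
            · exact Or.inr ⟨jt, h, h1, h2⟩

lemma nodup_foldl_stepU (k : Int) (items : List (Int × (Int × PySem.Set Int)))
    (s : PySem.Set Int) (hs : s.Nodup) : (items.foldl (stepU k) s).Nodup := by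
  induction items generalizing s with
  | nil => exact hs
  | cons it items ih =>
      refine ih _ ?_
      unfold stepU
      split
      · exact PySem.Set.nodup_union _ _ hs
      · exact hs

lemma mem_vals (l : List (Int × Int)) (d x : Int) :
    x ∈ vals l d ↔ ∃ pr ∈ l, prDiff pr = d ∧ (x = pr.1 ∨ x = pr.2) := by
  simp only [vals, List.mem_flatMap, List.mem_filter, decide_eq_true_eq]
  constructor
  · rintro ⟨pr, ⟨hpr, hd⟩, hx⟩
    exact ⟨pr, hpr, hd, by simpa using hx⟩
  · rintro ⟨pr, hpr, hd, hx⟩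
    exact ⟨pr, ⟨hpr, hd⟩, by simpa using hx⟩

-- membership in B's inner 'for a, b in run' add loop
lemma mem_addAll (run : List (Int × Int)) (s : PySem.Set Int) (x : Int) :
    x ∈ run.foldl (fun s pr => PySem.Set.add (PySem.Set.add s pr.1) pr.2) s ↔
      x ∈ s ∨ ∃ pr ∈ run, x = pr.1 ∨ x = pr.2 := by
  induction run generalizing s with
  | nil => simp
  | cons pr run ih =>
      simp only [List.foldl_cons, ih, PySem.Set.mem_add]
      constructor
      · rintro (((hx | hx) | hx) | ⟨qr, hq, h2⟩)
        · exact Or.inl hx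
        · exact Or.inr ⟨pr, by simp, Or.inl hx⟩
        · exact Or.inr ⟨pr, by simp, Or.inr hx⟩
        · exact Or.inr ⟨qr, by simp [hq], h2⟩
      · rintro (hx | ⟨qr, hq, h2⟩)
        · exact Or.inl (Or.inl (Or.inl hx))
        · rcases List.mem_cons.mp hq with h | h
          · subst h
            rcases h2 with h2 | h2
            · exact Or.inl (Or.inl (Or.inr h2))
            · exact Or.inl (Or.inr h2)
          · exact Or.inr ⟨qr, h, h2⟩

lemma nodup_addAll (run : List (Int × Int)) (s : PySem.Set Int) (hs : s.Nodup) :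
    (run.foldl (fun s pr => PySem.Set.add (PySem.Set.add s pr.1) pr.2) s).Nodup := by
  induction run generalizing s with
  | nil => exact hs
  | cons pr run ih => exact ih _ (PySem.Set.nodup_add _ _ (PySem.Set.nodup_add _ _ hs))

lemma nodup_flushB (k : Int) (s : PySem.Set Int) (run : List (Int × Int)) (hs : s.Nodup) :
    (flushB k s run).Nodup := by
  unfold flushB
  split
  · exact nodup_addAll _ _ hs
  · exact hs

-- count of a diff in an all-equal run
lemma count_map_prDiff_const (run : List (Int × Int)) (d0 d : Int)
    (hrun : ∀ q ∈ run, prDiff q = d0) :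
    (run.map prDiff).count d = if d = d0 then run.length else 0 := by
  induction run with
  | nil => simp
  | cons q run ih =>
      have hq : prDiff q = d0 := hrun q (by simp)
      have ih' := ih (fun q hq => hrun q (by simp [hq]))
      simp only [List.map_cons, List.count_cons, ih', hq, List.length_cons]
      by_cases hd : d = d0
      · simp [hd]
      · simp [hd, Ne.symm hd]

-- the central run-scan invariant for B's loop
lemma procB (k : Int) (l : List (Int × Int)) :
    ∀ (run : List (Int × Int)) (kept : PySem.Set Int) (x : Int),
    (∀ q ∈ run, ∀ q' ∈ run, prDiff q = prDiff q') →
    (∀ q ∈ run, ∀ p ∈ l, prDiff q ≤ prDiff p) →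
    l.Pairwise (fun p q => prDiff p ≤ prDiff q) →
    (x ∈ flushB k (l.foldl (stepB k) (run, kept)).2 (l.foldl (stepB k) (run, kept)).1 ↔
      x ∈ kept ∨ ∃ pr ∈ run ++ l,
        k ≤ (((run ++ l).map prDiff).count (prDiff pr) : Int) ∧ (x = pr.1 ∨ x = pr.2)) := by
  induction l with
  | nil =>
      intro run kept x hrun _ _
      simp only [List.foldl_nil, List.append_nil, flushB]
      by_cases hk : ((run.length : Int) ≥ k)
      · rw [if_pos hk, mem_addAll]
        constructor
        · rintro (hx | ⟨pr, hpr, h2⟩)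
          · exact Or.inl hx
          · refine Or.inr ⟨pr, hpr, ?_, h2⟩
            rw [count_map_prDiff_const run (prDiff pr) (prDiff pr)
              (fun q hq => hrun q hq pr hpr), if_pos rfl]
            exact hk
        · rintro (hx | ⟨pr, hpr, _, h2⟩)
          · exact Or.inl hx
          · exact Or.inr ⟨pr, hpr, h2⟩
      · rw [if_neg hk]
        constructor
        · exact Or.inl
        · rintro (hx | ⟨pr, hpr, h1, h2⟩)
          · exact hx
          · exfalso
            rw [count_map_prDiff_const run (prDiff pr) (prDiff pr)
              (fun q hq => hrun q hq pr hpr), if_pos rfl] at h1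
            exact hk h1
  | cons p l ih =>
      intro run kept x hrun hle hpw
      have hpwl : l.Pairwise (fun p q => prDiff p ≤ prDiff q) := hpw.of_cons
      have hpl : ∀ q ∈ l, prDiff p ≤ prDiff q := by
        intro q hq; exact List.rel_of_pairwise_cons hpw hq
      match hr : run with
      | [] =>
          simp only [List.foldl_cons, stepB, List.nil_append]
          have := ih [p] kept x (by simp) (by intro q hq p' hp'; simp at hq; subst hq; exact hpl p' hp') hpwl
          simpa using this
      | q :: rest =>
          by_cases hne : q.1 - q.2 ≠ p.1 - p.2
          · -- flush the finished run, restart with [p]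
            simp only [List.foldl_cons, stepB, if_pos hne]
            have hd0 : ∀ q' ∈ q :: rest, prDiff q' = prDiff q :=
              fun q' hq' => hrun q' hq' q (by simp)
            have hlt : prDiff q < prDiff p := by
              have h1 : prDiff q ≤ prDiff p := hle q (by simp) p (by simp)
              have h2 : prDiff q ≠ prDiff p := by simpa [prDiff] using hne
              omega
            have ih' := ih [p] (flushB k kept (q :: rest)) x (by simp)
              (by intro q' hq' p' hp'; simp at hq'; subst hq'; exact hpl p' hp') hpwl
            rw [ih']
            -- membership in the flushed kept
            have hflush : x ∈ flushB k kept (q :: rest) ↔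
                x ∈ kept ∨ ((k ≤ ((q :: rest).length : Int)) ∧
                  ∃ pr ∈ q :: rest, x = pr.1 ∨ x = pr.2) := by
              unfold flushB
              by_cases hk : (((q :: rest).length : Int) ≥ k)
              · rw [if_pos hk, mem_addAll]
                constructor
                · rintro (hx | h); exacts [Or.inl hx, Or.inr ⟨hk, h⟩]
                · rintro (hx | ⟨_, h⟩); exacts [Or.inl hx, Or.inr h]
              · rw [if_neg hk]
                constructor
                · exact Or.inl
                · rintro (hx | ⟨h1, _⟩); exacts [hx, absurd h1 hk]
            rw [hflush]
            -- counts over the whole list split between the run and the tail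
            have hcnt_run : ∀ pr ∈ q :: rest,
                (((q :: rest) ++ p :: l).map prDiff).count (prDiff pr) =
                  (q :: rest).length := by
              intro pr hpr
              have hdpr : prDiff pr = prDiff q := hd0 pr hpr
              rw [List.map_append, List.count_append,
                count_map_prDiff_const _ (prDiff q) _ hd0, hdpr, if_pos rfl]
              have : ((p :: l).map prDiff).count (prDiff q) = 0 := by
                rw [List.count_eq_zero]
                intro hmem
                rcases List.mem_map.mp hmem with ⟨p', hp', hdp'⟩
                have : prDiff p ≤ prDiff p' := by
                  rcases List.mem_cons.mp hp' with h | h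
                  · subst h; exact le_refl _
                  · exact hpl p' h
                omega
              omega
            have hcnt_tail : ∀ pr ∈ p :: l,
                (((q :: rest) ++ p :: l).map prDiff).count (prDiff pr) =
                  ((p :: l).map prDiff).count (prDiff pr) := by
              intro pr hpr
              have hge : prDiff p ≤ prDiff pr := by
                rcases List.mem_cons.mp hpr with h | h
                · subst h; exact le_refl _
                · exact hpl pr h
              rw [List.map_append, List.count_append,
                count_map_prDiff_const _ (prDiff q) _ hd0]
              rw [if_neg (by omega)]
              omega
            constructor
            · rintro ((hx | ⟨hk, ⟨pr, hpr, h2⟩⟩) | ⟨pr, hpr, h1, h2⟩)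
              · exact Or.inl hx
              · refine Or.inr ⟨pr, List.mem_append_left _ hpr, ?_, h2⟩
                rw [hcnt_run pr hpr]; simpa using hk
              · refine Or.inr ⟨pr, List.mem_append_right _ hpr, ?_, h2⟩
                rw [hcnt_tail pr hpr]; exact h1
            · rintro (hx | ⟨pr, hpr, h1, h2⟩)
              · exact Or.inl (Or.inl hx)
              · rcases List.mem_append.mp hpr with h | h
                · refine Or.inl (Or.inr ⟨?_, pr, h, h2⟩)
                  rw [hcnt_run pr h] at h1; simpa using h1
                · refine Or.inr ⟨pr, h, ?_, h2⟩
                  rw [hcnt_tail pr h] at h1; exact h1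
          · -- same diff: extend the run
            simp only [List.foldl_cons, stepB, if_neg hne]
            rw [not_not] at hne
            have hdq : prDiff p = prDiff q := by simp [prDiff, hne]
            have hrun' : ∀ a ∈ (q :: rest) ++ [p], ∀ b ∈ (q :: rest) ++ [p],
                prDiff a = prDiff b := by
              intro a ha b hb
              have hval : ∀ c ∈ (q :: rest) ++ [p], prDiff c = prDiff q := by
                intro c hc
                rcases List.mem_append.mp hc with h | h
                · exact hrun c h q (by simp)
                · simp at h; subst h; exact hdq
              rw [hval a ha, hval b hb]
            have hle' : ∀ a ∈ (q :: rest) ++ [p], ∀ b ∈ l, prDiff a ≤ prDiff b := by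
              intro a ha b hb
              rcases List.mem_append.mp ha with h | h
              · exact le_trans (by rw [hrun a h q (by simp), ← hdq]) (hpl b hb)
              · simp at h; subst h; exact hpl b hb
            have ih' := ih ((q :: rest) ++ [p]) kept x hrun' hle' hpwl
            rw [ih']
            have : (q :: rest) ++ [p] ++ l = (q :: rest) ++ p :: l := by simp
            rw [this]

lemma main_eq (k : Int) (score : List Int) : solution k score = solution_alt k score := by
  unfold solution solution_alt
  simp only [PySem.List.slice_zero_start, PySem.List.slice_none_none]
  set l := score.zip (PySem.List.slice score (some 1) none) with hl
  set sl := PySem.List.sorted l (fun p => p.1 - p.2) false with hsl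
  have hperm : sl.Perm l := PySem.List.sorted_perm _ _ _
  -- A-side characterisation (as in the cache analysis)
  have hkeys : (l.foldl stepA PySem.Dict.empty).keys = PySem.Set.ofList (l.map prDiff) := by
    rw [cacheA_keys]
    simp only [PySem.Dict.keys_empty]
    exact PySem.Set.update_nil_left _
  have hnodup : (l.foldl stepA PySem.Dict.empty).keys.Nodup := by
    rw [hkeys]; exact PySem.Set.nodup_ofList _
  have hitems := PySem.Dict.items_eq_map_keys _ hnodup (0, (PySem.Set.empty : PySem.Set Int))
  have hgetD : ∀ d : Int, (l.foldl stepA PySem.Dict.empty).getD d (0, PySem.Set.empty)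
      = (((l.map prDiff).count d : Int), PySem.Set.ofList (vals l d)) := by
    intro d
    rw [cacheA_getD]
    simp only [PySem.Dict.getD_empty, zero_add]
    rw [PySem.Set.update_empty]
  have hmemA : ∀ x : Int,
      x ∈ ((l.foldl stepA PySem.Dict.empty).items.foldl (stepU k) PySem.Set.empty) ↔
        ∃ pr ∈ l, k ≤ ((l.map prDiff).count (prDiff pr) : Int) ∧ (x = pr.1 ∨ x = pr.2) := by
    intro x
    rw [mem_foldl_stepU, hitems]
    constructor
    · rintro (hx | ⟨it, hit, h1, h2⟩)
      · simp [PySem.Set.empty] at hx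
      · rcases List.mem_map.mp hit with ⟨d, hd, rfl⟩
        rw [hgetD] at h1 h2
        rcases (mem_vals l d x).mp (by simpa using h2) with ⟨pr, hpr, hdiff, hx⟩
        exact ⟨pr, hpr, by simpa [hdiff] using h1, hx⟩
    · rintro ⟨pr, hpr, h1, hx⟩
      refine Or.inr ⟨(prDiff pr, (l.foldl stepA PySem.Dict.empty).getD (prDiff pr) (0, PySem.Set.empty)),
        List.mem_map.mpr ⟨prDiff pr, by
          rw [hkeys]
          exact (PySem.Set.mem_ofList _ _).mpr (List.mem_map_of_mem hpr), rfl⟩, ?_, ?_⟩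
      · rw [hgetD]; simpa using h1
      · rw [hgetD]
        simpa using (mem_vals l (prDiff pr) x).mpr ⟨pr, hpr, rfl, hx⟩
  -- B-side characterisation: the run scan over the sorted pairs
  have hpw : sl.Pairwise (fun p q => prDiff p ≤ prDiff q) := by
    have := PySem.List.sorted_pairwise l (fun p => p.1 - p.2)
    rw [← hsl] at this
    exact this.imp (fun h => h)
  have hmemB : ∀ x : Int,
      x ∈ flushB k (sl.foldl (stepB k) ([], PySem.Set.empty)).2
            (sl.foldl (stepB k) ([], PySem.Set.empty)).1 ↔
        ∃ pr ∈ l, k ≤ ((l.map prDiff).count (prDiff pr) : Int) ∧ (x = pr.1 ∨ x = pr.2) := by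
    intro x
    rw [procB k sl [] PySem.Set.empty x (by simp) (by simp) hpw]
    simp only [List.nil_append, PySem.Set.empty, List.not_mem_nil, false_or]
    constructor
    · rintro ⟨pr, hpr, h1, h2⟩
      refine ⟨pr, hperm.mem_iff.mp hpr, ?_, h2⟩
      rwa [(hperm.map prDiff).count_eq] at h1
    · rintro ⟨pr, hpr, h1, h2⟩
      refine ⟨pr, hperm.mem_iff.mpr hpr, ?_, h2⟩
      rwa [(hperm.map prDiff).count_eq]
  -- nodup of both result sets, then perm, then equal length
  have hA : ((l.foldl stepA PySem.Dict.empty).items.foldl (stepU k) PySem.Set.empty).Nodup :=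
    nodup_foldl_stepU _ _ _ (by simp [PySem.Set.empty])
  have hB2 : ((sl.foldl (stepB k) ([], PySem.Set.empty)).2 : PySem.Set Int).Nodup := by
    have : ∀ (m : List (Int × Int)) (st : List (Int × Int) × PySem.Set Int), st.2.Nodup →
        (m.foldl (stepB k) st).2.Nodup := by
      intro m
      induction m with
      | nil => intro st h; exact h
      | cons p m ihm =>
          intro st h
          refine ihm _ ?_
          rcases st with ⟨run, kept⟩
          match run with
          | [] => exact h
          | q :: rest =>
              simp only [stepB]
              split
              · exact nodup_flushB _ _ _ h
              · exact h
    exact this sl _ (by simp [PySem.Set.empty])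
  have hB : (flushB k (sl.foldl (stepB k) ([], PySem.Set.empty)).2
      (sl.foldl (stepB k) ([], PySem.Set.empty)).1).Nodup := nodup_flushB _ _ _ hB2
  have hperm2 := (List.perm_ext_iff_of_nodup hA hB).mpr (fun x => (hmemA x).trans (hmemB x).symm)
  rw [PySem.Set.len, PySem.Set.len, hperm2.length_eq]

-- ===== VERDICT (by name: the statement is the Claim_ definition above) =====
theorem solution_spec : Claim_equal_solution := by
  intro k score _
  unfold Spec_solution
  exact main_eq k score
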